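-- pv_equiv track=rewrite | github.com/atomic01/AdventOfCode | AdventOfCode2018/AoC2018/Day_2/Puzzle_3/main3.py | check_three_letters
-- ===== SOURCE A (Python) =====
-- def check_three_letters(box_string):
--     letter_counter = 0
--     for letter in box_string:
--         letter_counter = box_string.count(letter)
--         if letter_counter == 3:
--             return 1
--
--     if letter_counter != 3:
--         return 0
-- ===== SOURCE B (Python) =====
-- def check_three_letters(box_string):
--     s = sorted(box_string)
--     while s:
--         c = s[0]
--         k = 1
--         while k < len(s) and s[k] == c:
--             k += 1
--         if k == 3:
--             return 1
--         s = s[k:]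
--     return 0
-- ===== Notes on version B (the rewrite author's own statement) =====
-- stated objective: faster
-- what changed: Replaces A's per-letter whole-string .count() rescans with sort-then-run-length-scan: sort the characters once and walk the sorted list grouping consecutive equal characters, returning 1 on the first run of length exactly 3.
import Mathlib
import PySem

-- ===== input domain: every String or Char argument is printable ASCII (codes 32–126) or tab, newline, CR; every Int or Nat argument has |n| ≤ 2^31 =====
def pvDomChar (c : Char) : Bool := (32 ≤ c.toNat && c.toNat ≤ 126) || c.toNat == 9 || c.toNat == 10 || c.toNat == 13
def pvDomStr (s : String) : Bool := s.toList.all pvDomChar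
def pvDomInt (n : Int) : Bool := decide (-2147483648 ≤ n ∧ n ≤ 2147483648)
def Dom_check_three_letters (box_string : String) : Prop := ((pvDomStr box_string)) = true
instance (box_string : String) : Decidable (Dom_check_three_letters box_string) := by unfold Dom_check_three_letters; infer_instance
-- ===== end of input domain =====

-- B sorts the characters once and run-length-scans the sorted list for a run of length exactly 3,
-- instead of A's per-letter whole-string .count() rescans (return value only; neither mutates its argument).

-- ===== PORT A =====
-- A's for-loop carrying letter_counter; on [] the trailing `if letter_counter != 3: return 0`
-- fires (the fall-off-the-end None branch is unreachable: letter_counter is the count of the last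
-- letter, which would have triggered the early return 1; we port that dead branch as 0)
def check_three_letters_go (full : List Char) (lc : Int) : List Char → Int
  | [] => if lc ≠ 3 then 0 else 0
  | c :: rest =>
      let lc' : Int := (full.count c : Int)   -- box_string.count(letter): single-char substring count = char count
      if lc' = 3 then 1 else check_three_letters_go full lc' rest

def check_three_letters (box_string : String) : Int :=
  check_three_letters_go box_string.toList 0 box_string.toList

-- ===== PORT B =====
-- Source B's inner while: `k = 1; while k < len(s) and s[k] == c: k += 1`
def check_three_letters_inner (s : List Char) (c : Char) (k : Nat) : Nat :=
  if h : k < s.length then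
    if s[k] = c then check_three_letters_inner s c (k + 1) else k
  else k
termination_by s.length - k

-- needed by the port's decreasing_by: the inner while never moves k backwards
theorem le_inner (s : List Char) (c : Char) (k : Nat) : k ≤ check_three_letters_inner s c k := by
  fun_induction check_three_letters_inner s c k with
  | case1 k h hc ih => omega
  | case2 k h hc => omega
  | case3 k h => omega

-- Source B's outer while: `while s: c = s[0]; …inner…; if k == 3: return 1; s = s[k:]` (s[k:] with 0 ≤ k = drop k)
def check_three_letters_scan : List Char → Int
  | [] => 0
  | c :: rest =>
      let k := check_three_letters_inner (c :: rest) c 1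
      if k = 3 then 1 else check_three_letters_scan ((c :: rest).drop k)
termination_by s => s.length
decreasing_by
  have := le_inner (c :: rest) c 1
  simp only [List.length_drop, List.length_cons]
  omega

def check_three_letters_alt (box_string : String) : Int :=
  check_three_letters_scan (PySem.List.sorted box_string.toList (fun x => x))

-- ===== PRECONDITION & SPEC =====
def Spec_check_three_letters (box_string : String) (out : Int) : Prop := out = check_three_letters_alt box_string
instance (box_string : String) (out : Int) : Decidable (Spec_check_three_letters box_string out) := by unfold Spec_check_three_letters; infer_instance

-- ===== CLAIM (what is proved, stated in full; the proofs are below) =====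
def Claim_equal_check_three_letters : Prop := ∀ (box_string : String), Dom_check_three_letters box_string → Spec_check_three_letters box_string (check_three_letters box_string)

-- ===== LEMMAS AND PROOFS =====

-- A's loop returns 1 iff some remaining letter has full-count 3, else 0 (any lc)
theorem go_eq (full : List Char) (lc : Int) (rest : List Char) :
    check_three_letters_go full lc rest
      = if ∃ c ∈ rest, full.count c = 3 then 1 else 0 := by
  induction rest generalizing lc with
  | nil => simp [check_three_letters_go]
  | cons c rest ih =>
      simp only [check_three_letters_go, ih]
      by_cases h : full.count c = 3
      · simp [h]
      · have : ¬ ((full.count c : Int) = 3) := by exact_mod_cast fun hh => h (by exact_mod_cast hh)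
        simp [h, this]

-- the inner while computes k + length of the run of c's starting at position k
theorem inner_eq (s : List Char) (c : Char) (k : Nat) :
    check_three_letters_inner s c k = k + ((s.drop k).takeWhile (fun x => x == c)).length := by
  fun_induction check_three_letters_inner s c k with
  | case1 k h hc ih =>
      rw [ih, List.drop_eq_getElem_cons h, List.takeWhile_cons]
      simp only [hc, beq_self_eq_true, if_true, List.length_cons]
      omega
  | case2 k h hc =>
      rw [List.drop_eq_getElem_cons h, List.takeWhile_cons]
      simp [beq_iff_eq, hc]
  | case3 k h =>
      rw [List.drop_eq_nil_iff.2 (by omega)]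
      simp

-- runs in a (≤)-sorted list are exactly the multiplicities: the scan finds a length-3 run iff some char has count 3
theorem scan_sorted : ∀ (n : Nat) (l : List Char), l.length ≤ n → l.Pairwise (· ≤ ·) →
    check_three_letters_scan l = if ∃ c ∈ l, l.count c = 3 then 1 else 0 := by
  intro n
  induction n with
  | zero =>
      intro l hl _
      have : l = [] := List.eq_nil_of_length_eq_zero (by omega)
      subst this; simp [check_three_letters_scan]
  | succ n ih =>
      intro l hl hp
      cases l with
      | nil => simp [check_three_letters_scan]
      | cons c rest =>
        set t := rest.takeWhile (fun x => x == c) with ht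
        set d := rest.dropWhile (fun x => x == c) with hd
        have hrest : t ++ d = rest := List.takeWhile_append_dropWhile
        have htc : ∀ x ∈ t, x = c := fun x hx => by
          have := List.mem_takeWhile_imp hx; simpa [beq_iff_eq] using this
        have hcle : ∀ x ∈ rest, c ≤ x := (List.pairwise_cons.1 hp).1
        have hpr : rest.Pairwise (· ≤ ·) := (List.pairwise_cons.1 hp).2
        have hpd : d.Pairwise (· ≤ ·) := hpr.sublist (List.dropWhile_sublist _)
        -- every element of the dropWhile part is strictly greater than c
        have hcd : ∀ x ∈ d, c < x := by
          intro x hx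
          cases hdd : d with
          | nil => rw [hdd] at hx; simp at hx
          | cons h tl =>
            have hhne : ¬ (h == c) = true := by
              have := List.head?_dropWhile_not (fun x => x == c) rest
              rw [← hd, hdd] at this; simpa using this
            have hhne' : h ≠ c := by simpa [beq_iff_eq] using hhne
            have hh : c < h := lt_of_le_of_ne (hcle h (by rw [← hrest]; exact List.mem_append_right _ (by rw [hdd]; simp))) (Ne.symm hhne')
            rw [hdd] at hx
            rcases List.mem_cons.1 hx with rfl | hx
            · exact hh
            · exact lt_of_lt_of_le hh ((List.pairwise_cons.1 (hdd ▸ hpd)).1 x hx)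
        have hcnotd : c ∉ d := fun hc => lt_irrefl c (hcd c hc)
        -- count of c in the whole list is 1 + |t|
        have hcount_c : (c :: rest).count c = 1 + t.length := by
          rw [← hrest, List.count_cons_self, List.count_append,
            List.count_eq_length.2 (fun b hb => (htc b hb).symm),
            List.count_eq_zero.2 hcnotd]
          omega
        -- counts of elements of d are untouched by the prefix
        have hcount_d : ∀ x ∈ d, (c :: rest).count x = d.count x := by
          intro x hx
          have hxc : x ≠ c := fun h => lt_irrefl c (h ▸ hcd x hx)
          have hxt : t.count x = 0 := List.count_eq_zero.2 (fun hxt => hxc (htc x hxt))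
          have hcx : ¬ (c = x) := fun h => hxc h.symm
          calc List.count x (c :: rest) = List.count x (c :: (t ++ d)) := by rw [hrest]
            _ = List.count x d := by simp [List.count_append, hxt, hcx]
        -- unfold one step of the scan
        have hk : check_three_letters_inner (c :: rest) c 1 = 1 + t.length := by
          rw [inner_eq]; simp [ht]
        have hdrop : (c :: rest).drop (1 + t.length) = d := by
          have : (c :: rest).drop (1 + t.length) = rest.drop t.length := by
            simp [Nat.add_comm 1 t.length]
          rw [this, ← hrest, List.drop_left]
        have hstep : check_three_letters_scan (c :: rest)
            = if 1 + t.length = 3 then 1 else check_three_letters_scan d := by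
          rw [check_three_letters_scan]
          simp only [hk, hdrop]
        have hlen : d.length ≤ n := by
          have h1 := (List.dropWhile_sublist (l := rest) (fun x => x == c)).length_le
          rw [← hd] at h1
          simp only [List.length_cons] at hl
          omega
        -- the existential splits along the run decomposition
        have hex : (∃ x ∈ c :: rest, (c :: rest).count x = 3)
            ↔ (1 + t.length = 3 ∨ ∃ x ∈ d, d.count x = 3) := by
          constructor
          · rintro ⟨x, hx, hcx⟩
            rcases List.mem_cons.1 hx with rfl | hx
            · left; rw [hcount_c] at hcx; omega
            · rw [← hrest] at hx
              rcases List.mem_append.1 hx with hx | hx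
              · left
                have hxc := htc x hx; subst hxc
                rw [hcount_c] at hcx; omega
              · right; exact ⟨x, hx, by rw [← hcount_d x hx]; exact hcx⟩
          · rintro (h3 | ⟨x, hx, hcx⟩)
            · exact ⟨c, List.mem_cons_self, by rw [hcount_c]; omega⟩
            · exact ⟨x, List.mem_cons.2 (Or.inr (by rw [← hrest]; exact List.mem_append_right _ hx)),
                by rw [hcount_d x hx]; exact hcx⟩
        rw [hstep]
        by_cases h3 : 1 + t.length = 3
        · rw [if_pos h3, if_pos (hex.2 (Or.inl h3))]
        · rw [if_neg h3, ih d hlen hpd]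
          by_cases he : ∃ x ∈ d, d.count x = 3
          · rw [if_pos he, if_pos (hex.2 (Or.inr he))]
          · rw [if_neg he, if_neg (fun hh => by rcases hex.1 hh with h | h; exact h3 h; exact he h)]

-- ===== VERDICT (by name: the statement is the Claim_ definition above) =====
theorem check_three_letters_spec : Claim_equal_check_three_letters := by
  intro s _
  show check_three_letters s = check_three_letters_alt s
  rw [check_three_letters, check_three_letters_alt, go_eq,
    scan_sorted (PySem.List.sorted s.toList (fun x => x)).length _ le_rfl
      (by simpa using PySem.List.sorted_pairwise s.toList (fun x => x))]
  have hperm := PySem.List.sorted_perm s.toList (fun x => x) false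
  by_cases h : ∃ c ∈ s.toList, s.toList.count c = 3
  · rw [if_pos h]
    obtain ⟨c, hc, hc3⟩ := h
    rw [if_pos ⟨c, hperm.mem_iff.2 hc, by rwa [hperm.count_eq]⟩]
  · rw [if_neg h]
    rw [if_neg (fun hh => h (by
      obtain ⟨c, hc, hc3⟩ := hh
      exact ⟨c, hperm.mem_iff.1 hc, by rwa [← hperm.count_eq]⟩))]
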